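-- pv_equiv track=rewrite | github.com/tommo/cpp2nim | cpp2nim/utils.py | get_root_from_glob
-- ===== SOURCE A (Python) =====
-- def get_root_from_glob(pattern: str) -> str:
--     """Get the root directory from a glob pattern.
--
--     Args:
--         pattern: A file glob pattern.
--
--     Returns:
--         The root directory portion without wildcards.
--
--     Example:
--         >>> get_root_from_glob("/usr/include/*.h")
--         '/usr/include/'
--         >>> get_root_from_glob("/path/to/file.h")
--         '/path/to/'
--     """
--     # Case where a specific file is given (no glob)
--     if "*" not in pattern and "?" not in pattern:
--         parts = pattern.split("/")
--         return "/".join(parts[:-1]) + "/"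
--
--     # Glob case
--     parts = pattern.split("/")
--     result = ""
--     for part in parts:
--         if "*" not in part and "?" not in part:
--             result += part + "/"
--         else:
--             break
--     return result
-- ===== SOURCE B (Python) =====
-- def get_root_from_glob(pattern: str) -> str:
--     """Get the root directory from a glob pattern (no splitting: locate the
--     first wildcard, then scan back to the nearest '/')."""
--     n = len(pattern)
--     w = n
--     for i, c in enumerate(pattern):
--         if c in "*?":
--             w = i
--             break
--     i = w
--     while i > 0 and pattern[i - 1] != "/":
--         i -= 1
--     if i == 0:
--         return "/" if w == n else ""
--     return pattern[:i]
-- ===== Notes on version B (the rewrite author's own statement) =====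
-- stated objective: alternative
-- what changed: B never splits the string: it finds the index of the first wildcard character, scans backwards from there to the nearest slash separator, and returns that prefix slice (with the same root fallback for a slash-free non-glob input), instead of splitting on the separator and re-joining/concatenating components.
import Mathlib
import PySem

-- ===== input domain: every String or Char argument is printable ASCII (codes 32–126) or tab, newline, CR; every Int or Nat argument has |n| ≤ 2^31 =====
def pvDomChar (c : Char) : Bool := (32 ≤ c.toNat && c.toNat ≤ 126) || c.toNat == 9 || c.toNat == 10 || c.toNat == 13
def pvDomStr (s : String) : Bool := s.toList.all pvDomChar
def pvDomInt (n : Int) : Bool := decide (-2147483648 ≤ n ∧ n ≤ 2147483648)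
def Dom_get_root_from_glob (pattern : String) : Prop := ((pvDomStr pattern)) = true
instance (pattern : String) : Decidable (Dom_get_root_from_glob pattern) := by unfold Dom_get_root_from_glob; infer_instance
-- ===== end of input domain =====

-- B locates the first wildcard by a forward scan and walks back to the nearest '/', returning
-- a prefix slice, instead of A's split-on-'/' plus join/concatenate; objective: alternative (same cost).

-- ===== PORT A =====
-- the loop 'for part in parts: if no wildcard: result += part + "/" else: break' (result = accumulator)
def pvA_loop : List (List Char) → List Char → List Char
  | [], result => result
  | part :: rest, result =>
    if !(PySem.Chars.isIn ['*'] part) && !(PySem.Chars.isIn ['?'] part) then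
      pvA_loop rest (result ++ part ++ ['/'])
    else result

def get_root_from_glob (pattern : String) : String :=
  let cs := pattern.toList
  if !(PySem.Chars.isIn ['*'] cs) && !(PySem.Chars.isIn ['?'] cs) then
    -- "/".join(pattern.split("/")[:-1]) + "/"
    let parts := (PySem.Chars.split? cs ['/']).getD []
    String.ofList (PySem.Chars.join ['/'] (PySem.List.slice parts none (some (-1))) ++ ['/'])
  else
    let parts := (PySem.Chars.split? cs ['/']).getD []
    String.ofList (pvA_loop parts [])

-- ===== PORT B =====
-- 'for i, c in enumerate(pattern): if c in "*?": w = i; break'   (w stays n when there is no wildcard)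

def pvB_findw (n : Nat) : List Char → Nat → Nat
  | [], _ => n
  | c :: rest, i => if c = '*' ∨ c = '?' then i else pvB_findw n rest (i + 1)

-- 'while i > 0 and pattern[i - 1] != "/": i -= 1'

def pvB_back (cs : List Char) : Nat → Nat
  | 0 => 0
  | j + 1 => if cs.getD j ' ' ≠ '/' then pvB_back cs j else j + 1

def get_root_from_glob_alt (pattern : String) : String :=
  let cs := pattern.toList
  let n := cs.length
  let w := pvB_findw n cs 0
  let i := pvB_back cs w
  if i = 0 then (if w = n then "/" else "")
  else String.ofList (PySem.List.slice cs none (some (i : Int)))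

-- ===== PRECONDITION & SPEC =====
def Spec_get_root_from_glob (pattern : String) (out : String) : Prop := out = get_root_from_glob_alt pattern
instance (pattern : String) (out : String) : Decidable (Spec_get_root_from_glob pattern out) := by unfold Spec_get_root_from_glob; infer_instance

-- ===== CLAIM (what is proved, stated in full; the proofs are below) =====
def Claim_equal_get_root_from_glob : Prop := ∀ (pattern : String), Dom_get_root_from_glob pattern → Spec_get_root_from_glob pattern (get_root_from_glob pattern)

-- ===== LEMMAS AND PROOFS =====

-- c ∈ "*?" as a proposition
def pvWC (c : Char) : Prop := c = '*' ∨ c = '?'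

theorem pvIsIn_singleton (a : Char) (cs : List Char) :
    PySem.Chars.isIn [a] cs = true ↔ a ∈ cs := by
  rw [PySem.Chars.isIn_iff_infix]; exact List.singleton_infix_iff a cs

theorem pvA_loop_acc (parts : List (List Char)) (res : List Char) :
    pvA_loop parts res = res ++ pvA_loop parts [] := by
  induction parts generalizing res with
  | nil => simp [pvA_loop]
  | cons p rest ih =>
    simp only [pvA_loop]
    split
    · rw [ih (res ++ p ++ ['/']), ih ([] ++ p ++ ['/'])]; simp
    · simp

theorem pvB_back_zero (cs : List Char) (w : Nat) (h : '/' ∉ cs.take w) :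
    pvB_back cs w = 0 := by
  induction w with
  | zero => rfl
  | succ j ih =>
    have hj : cs.getD j ' ' ≠ '/' := by
      intro he
      by_cases hl : j < cs.length
      · exact h (by
          rw [List.getD_eq_getElem _ _ hl] at he
          exact List.mem_take_iff_getElem.mpr ⟨j, by omega, by simpa using he⟩)
      · simp [List.getD_eq_getElem?_getD, List.getElem?_eq_none (by omega : cs.length ≤ j)] at he
    simp only [pvB_back, if_pos hj]
    refine ih (fun hm => ?_)
    rcases List.mem_take_iff_getElem.mp hm with ⟨i, hi, he⟩
    exact h (List.mem_take_iff_getElem.mpr ⟨i, by omega, he⟩)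

theorem pvB_back_succ (cs : List Char) (j : Nat) :
    pvB_back cs (j + 1) = if cs.getD j ' ' ≠ '/' then pvB_back cs j else j + 1 := rfl

theorem pvB_back_append (xs ys : List Char) (k : Nat) :
    pvB_back (xs ++ '/' :: ys) (xs.length + 1 + k) =
      (if pvB_back ys k = 0 then xs.length + 1 else xs.length + 1 + pvB_back ys k) := by
  induction k with
  | zero =>
    have hg : (xs ++ '/' :: ys).getD xs.length ' ' = '/' := by
      rw [List.getD_eq_getElem _ _ (by simp)]
      simp
    rw [show xs.length + 1 + 0 = xs.length + 1 from rfl, pvB_back_succ,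
        if_neg (not_not_intro hg)]
    simp [pvB_back]
  | succ k ih =>
    have hget : (xs ++ '/' :: ys).getD (xs.length + 1 + k) ' ' = ys.getD k ' ' := by
      have h1 : xs.length + 1 + k - xs.length = k + 1 := by omega
      simp only [List.getD_eq_getElem?_getD,
        List.getElem?_append_right (by omega : xs.length ≤ xs.length + 1 + k), h1,
        List.getElem?_cons_succ]
    rw [show xs.length + 1 + (k + 1) = (xs.length + 1 + k) + 1 from rfl,
        pvB_back_succ, pvB_back_succ, hget]
    by_cases hc : ys.getD k ' ' = '/'
    · rw [if_neg (not_not_intro hc), if_neg (not_not_intro hc), if_neg (Nat.succ_ne_zero k)]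
      omega
    · rw [if_pos hc, if_pos hc, ih]

theorem pvB_back_ne_zero (cs : List Char) (w : Nat) (h : '/' ∈ cs.take w) :
    pvB_back cs w ≠ 0 := by
  induction w with
  | zero => simp at h
  | succ j ih =>
    simp only [pvB_back]
    split
    · rename_i hne
      refine ih ?_
      rcases List.mem_take_iff_getElem.mp h with ⟨i, hi, he⟩
      by_cases hij : i = j
      · exact absurd (by rw [List.getD_eq_getElem _ _ (by omega)]; subst hij; exact he) hne
      · exact List.mem_take_iff_getElem.mpr ⟨i, by omega, he⟩
    · omega

theorem pvB_findw_none (n : Nat) (cs : List Char) (i : Nat)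
    (h : ∀ c ∈ cs, ¬ pvWC c) : pvB_findw n cs i = n := by
  induction cs generalizing i with
  | nil => rfl
  | cons c rest ih =>
    have : ¬ (c = '*' ∨ c = '?') := h c (by simp)
    simp only [pvB_findw, if_neg this]
    exact ih (i+1) (fun x hx => h x (by simp [hx]))

theorem pvB_findw_split (n : Nat) (u : List Char) (c : Char) (v : List Char) (i : Nat)
    (hu : ∀ x ∈ u, ¬ pvWC x) (hc : pvWC c) :
    pvB_findw n (u ++ c :: v) i = i + u.length := by
  induction u generalizing i with
  | nil => simp only [List.nil_append, pvB_findw, if_pos (show c = '*' ∨ c = '?' from hc)]; simp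
  | cons d rest ih =>
    have : ¬ (d = '*' ∨ d = '?') := hu d (by simp)
    simp only [List.cons_append, pvB_findw, if_neg this]
    rw [ih (i+1) (fun x hx => hu x (by simp [hx]))]
    simp; omega

-- reference form of Python's s.split('/'), structural on the char list

def pvSplit : List Char → List (List Char)
  | [] => [[]]
  | d :: rest =>
    if d = '/' then [] :: pvSplit rest
    else
      match pvSplit rest with
      | [] => [[d]]
      | h :: t => (d :: h) :: t

theorem pvSplit_ne_nil (cs : List Char) : pvSplit cs ≠ [] := by
  cases cs with
  | nil => simp [pvSplit]
  | cons d rest =>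
    simp only [pvSplit]
    split
    · simp
    · split <;> simp

theorem pvSplit_no_slash (cs : List Char) (h : '/' ∉ cs) : pvSplit cs = [cs] := by
  induction cs with
  | nil => rfl
  | cons d rest ih =>
    have hd : d ≠ '/' := by intro he; exact h (by simp [he])
    have hr := ih (fun hm => h (by simp [hm]))
    simp only [pvSplit, if_neg hd, hr]

theorem pvSplit_append (seg rest : List Char) (h : '/' ∉ seg) :
    pvSplit (seg ++ '/' :: rest) = seg :: pvSplit rest := by
  induction seg with
  | nil => simp [pvSplit]
  | cons d s ih =>
    have hd : d ≠ '/' := by intro he; exact h (by simp [he])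
    have hr := ih (fun hm => h (by simp [hm]))
    simp only [List.cons_append, pvSplit, if_neg hd, hr]

theorem pvSplit_go (fuel : Nat) :
    ∀ (l cur : List Char) (acc : List (List Char)), l.length ≤ fuel →
      PySem.Chars.splitOn.go ['/'] fuel l cur acc =
        acc.reverse ++ (match pvSplit l with
                        | [] => [cur.reverse]
                        | h :: t => (cur.reverse ++ h) :: t) := by
  induction fuel with
  | zero =>
    intro l cur acc hl
    have : l = [] := by cases l <;> simp at hl ⊢
    subst this
    simp [PySem.Chars.splitOn.go, pvSplit]
  | succ fuel ih =>
    intro l cur acc hl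
    cases l with
    | nil => simp [PySem.Chars.splitOn.go, pvSplit]
    | cons c rest =>
      by_cases hc : c = '/'
      · subst hc
        have hpre : List.isPrefixOf ['/'] ('/' :: rest) = true := by simp [List.isPrefixOf]
        rw [show PySem.Chars.splitOn.go ['/'] (fuel+1) ('/' :: rest) cur acc =
              PySem.Chars.splitOn.go ['/'] fuel (List.drop (['/'] : List Char).length ('/' :: rest)) [] (cur.reverse :: acc) by
            simp [PySem.Chars.splitOn.go, hpre]]
        simp only [List.length_cons, List.length_nil, List.drop_succ_cons, List.drop_zero]
        rw [ih rest [] (cur.reverse :: acc) (by simpa using hl)]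
        rcases hsp : pvSplit rest with _ | ⟨h, t⟩
        · exact absurd hsp (pvSplit_ne_nil rest)
        · simp [pvSplit, hsp]
      · have hpre : List.isPrefixOf ['/'] (c :: rest) = false := by
          simp [List.isPrefixOf]; exact fun h => absurd h.symm hc
        rw [show PySem.Chars.splitOn.go ['/'] (fuel+1) (c :: rest) cur acc =
              PySem.Chars.splitOn.go ['/'] fuel rest (c :: cur) acc by
            simp [PySem.Chars.splitOn.go, hpre]]
        rw [ih rest (c :: cur) acc (by simpa using hl)]
        rcases hsp : pvSplit rest with _ | ⟨h, t⟩
        · exact absurd hsp (pvSplit_ne_nil rest)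
        · simp [pvSplit, hsp, if_neg hc]

theorem pvSplit_eq (cs : List Char) :
    PySem.Chars.splitOn cs ['/'] = pvSplit cs := by
  rw [PySem.Chars.splitOn, pvSplit_go (cs.length + 1) cs [] [] (by omega)]
  rcases hsp : pvSplit cs with _ | ⟨h, t⟩
  · exact absurd hsp (pvSplit_ne_nil cs)
  · simp

theorem pvFirst (p : Char → Prop) (cs : List Char) (h : ∃ c ∈ cs, p c) :
    ∃ u c v, cs = u ++ c :: v ∧ p c ∧ ∀ x ∈ u, ¬ p x := by
  induction cs with
  | nil => simp at h
  | cons d rest ih =>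
    by_cases hd : p d
    · exact ⟨[], d, rest, by simp, hd, by simp⟩
    · have : ∃ c ∈ rest, p c := by
        rcases h with ⟨c, hc, hp⟩
        rcases List.mem_cons.mp hc with rfl | hm
        · exact absurd hp hd
        · exact ⟨c, hm, hp⟩
      rcases ih this with ⟨u, c, v, he, hp, hu⟩
      exact ⟨d :: u, c, v, by simp [he], hp, by
        intro x hx
        rcases List.mem_cons.mp hx with rfl | hm
        · exact hd
        · exact hu x hm⟩

theorem pvTake_append (seg rest : List Char) (m : Nat) :
    (seg ++ '/' :: rest).take (seg.length + 1 + m) = seg ++ '/' :: rest.take m := by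
  rw [List.take_append]
  congr 1
  · exact List.take_of_length_le (by omega)
  · have h1 : seg.length + 1 + m - seg.length = m + 1 := by omega
    rw [h1, List.take_succ_cons]

theorem pvGetD_append_left (xs zs : List Char) (j : Nat) (h : j < xs.length) :
    (xs ++ zs).getD j ' ' = xs.getD j ' ' := by
  rw [List.getD_eq_getElem _ _ (by simp; omega), List.getD_eq_getElem _ _ h,
      List.getElem_append_left h]

theorem pvGetD_append_mid (xs ys : List Char) (k : Nat) :
    (xs ++ '/' :: ys).getD (xs.length + 1 + k) ' ' = ys.getD k ' ' := by
  have h1 : xs.length + 1 + k - xs.length = k + 1 := by omega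
  simp only [List.getD_eq_getElem?_getD,
    List.getElem?_append_right (by omega : xs.length ≤ xs.length + 1 + k), h1,
    List.getElem?_cons_succ]

theorem pvGetD_append_self (u : List Char) (c : Char) (v : List Char) :
    (u ++ c :: v).getD u.length ' ' = c := by
  rw [List.getD_eq_getElem _ _ (by simp)]
  simp

theorem pvSlice_nat (cs : List Char) (i : Nat) :
    PySem.List.slice cs none (some (i : Int)) = cs.take i := by
  rw [PySem.List.slice_to cs (by omega : (0:Int) ≤ (i : Int))]
  simp

theorem pvMain_NW : ∀ (n : Nat) (cs : List Char), cs.length ≤ n →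
    PySem.Chars.join ['/'] ((pvSplit cs).dropLast) ++ ['/'] =
      (if pvB_back cs cs.length = 0 then ['/'] else cs.take (pvB_back cs cs.length)) := by
  intro n
  induction n with
  | zero =>
    intro cs h
    have : cs = [] := by cases cs <;> simp at h ⊢
    subst this
    simp [pvSplit, PySem.Chars.join_nil, pvB_back]
  | succ n ih =>
    intro cs hlen
    by_cases hs : '/' ∈ cs
    · rcases pvFirst (fun c => c = '/') cs ⟨'/', hs, rfl⟩ with ⟨seg, c, rest, he, hc, hseg⟩
      subst hc
      subst he
      have hnseg : '/' ∉ seg := fun hm => hseg '/' hm rfl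
      have hsplit := pvSplit_append seg rest hnseg
      have hlcs : (seg ++ '/' :: rest).length = seg.length + 1 + rest.length := by simp; omega
      by_cases hr : '/' ∈ rest
      · -- rest contains a slash: pvSplit rest has ≥ 2 elements
        rcases pvFirst (fun c => c = '/') rest ⟨'/', hr, rfl⟩ with ⟨s2, c2, r2, he2, hc2, hs2⟩
        subst hc2
        have hns2 : '/' ∉ s2 := fun hm => hs2 '/' hm rfl
        have hsplit2 : pvSplit rest = s2 :: pvSplit r2 := by
          rw [he2]; exact pvSplit_append s2 r2 hns2
        rcases hsp3 : pvSplit r2 with _ | ⟨h3, t3⟩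
        · exact absurd hsp3 (pvSplit_ne_nil r2)
        have ihr := ih rest (by rw [hlcs] at hlen; omega)
        have hi' : pvB_back rest rest.length ≠ 0 := pvB_back_ne_zero rest rest.length (by simpa using hr)
        rw [if_neg hi'] at ihr
        have hdl : (pvSplit (seg ++ '/' :: rest)).dropLast = seg :: (pvSplit rest).dropLast := by
          rw [hsplit, List.dropLast_cons_of_ne_nil (by rw [hsplit2]; simp)]
        have hdl2 : (pvSplit rest).dropLast = s2 :: (pvSplit r2).dropLast := by
          rw [hsplit2, List.dropLast_cons_of_ne_nil (by rw [hsp3]; simp)]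
        rw [hdl, hdl2, hsp3]
        rcases hdl3 : (h3 :: t3).dropLast with _ | ⟨h4, t4⟩
        · -- pvSplit r2 has one element: join [seg, s2]
          rw [PySem.Chars.join_cons_cons, PySem.Chars.join_singleton]
          rw [hdl2, hsp3, hdl3] at ihr
          rw [PySem.Chars.join_singleton] at ihr
          rw [hlcs, pvB_back_append seg rest rest.length, if_neg hi',
              if_neg (by omega), pvTake_append]
          rw [← ihr]
          simp
        · rw [PySem.Chars.join_cons_cons, PySem.Chars.join_cons_cons]
          rw [hdl2, hsp3, hdl3, PySem.Chars.join_cons_cons] at ihr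
          rw [hlcs, pvB_back_append seg rest rest.length, if_neg hi',
              if_neg (by omega), pvTake_append]
          rw [← ihr]
          simp
      · -- rest has no slash
        have hsplit2 : pvSplit rest = [rest] := pvSplit_no_slash rest hr
        have hdl : (pvSplit (seg ++ '/' :: rest)).dropLast = [seg] := by
          rw [hsplit, hsplit2]
          rfl
        rw [hdl, PySem.Chars.join_singleton]
        have hi0 : pvB_back rest rest.length = 0 := pvB_back_zero rest rest.length (by simpa using hr)
        rw [hlcs, pvB_back_append seg rest rest.length, if_pos hi0,
            if_neg (by omega)]
        rw [show seg.length + 1 = seg.length + 1 + 0 by omega, pvTake_append]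
        simp
    · have hsplit : pvSplit cs = [cs] := pvSplit_no_slash cs hs
      rw [hsplit]
      have hi0 : pvB_back cs cs.length = 0 := pvB_back_zero cs cs.length (by simpa using hs)
      rw [if_pos hi0]
      rfl

theorem pvMain_G : ∀ (n : Nat) (cs : List Char), cs.length ≤ n →
    ∀ (w : Nat), w < cs.length → pvWC (cs.getD w ' ') → (∀ j < w, ¬ pvWC (cs.getD j ' ')) →
    pvA_loop (pvSplit cs) [] =
      (if pvB_back cs w = 0 then [] else cs.take (pvB_back cs w)) := by
  intro n
  induction n with
  | zero =>
    intro cs h w hw _ _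
    omega
  | succ n ih =>
    intro cs hlen w hw hwc hmin
    by_cases hs : '/' ∈ cs
    · rcases pvFirst (fun c => c = '/') cs ⟨'/', hs, rfl⟩ with ⟨seg, c, rest, he, hc, hseg⟩
      subst hc
      subst he
      have hnseg : '/' ∉ seg := fun hm => hseg '/' hm rfl
      have hsplit := pvSplit_append seg rest hnseg
      have hlcs : (seg ++ '/' :: rest).length = seg.length + 1 + rest.length := by simp; omega
      rcases lt_trichotomy w seg.length with hlt | heq | hgt
      · -- wildcard inside seg: loop breaks on the first part
        have hwseg : pvWC (seg.getD w ' ') := by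
          rw [← pvGetD_append_left seg ('/' :: rest) w hlt]; exact hwc
        have hmem : seg.getD w ' ' ∈ seg := by
          rw [List.getD_eq_getElem _ _ hlt]; exact List.getElem_mem _
        have hfail : (!(PySem.Chars.isIn ['*'] seg) && !(PySem.Chars.isIn ['?'] seg)) = false := by
          rcases hwseg with h | h
          · have : PySem.Chars.isIn ['*'] seg = true := (pvIsIn_singleton '*' seg).mpr (h ▸ hmem)
            simp [this]
          · have : PySem.Chars.isIn ['?'] seg = true := (pvIsIn_singleton '?' seg).mpr (h ▸ hmem)
            simp [this]
        have hb0 : pvB_back (seg ++ '/' :: rest) w = 0 := by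
          apply pvB_back_zero
          intro hm
          rw [List.take_append_of_le_length (by omega)] at hm
          exact hnseg (List.mem_of_mem_take hm)
        rw [hsplit, if_pos hb0]
        simp only [pvA_loop, hfail]
        rfl
      · -- w = seg.length: cs.getD w = '/', not a wildcard
        exfalso
        have : (seg ++ '/' :: rest).getD w ' ' = '/' := by
          subst heq
          rw [List.getD_eq_getElem _ _ (by simp)]
          simp
        rw [this] at hwc
        rcases hwc with h | h <;> simp at h
      · -- wildcard after the first slash
        have hkdef : w = seg.length + 1 + (w - seg.length - 1) := by omega
        set k := w - seg.length - 1 with hk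
        have hsegok : ∀ x ∈ seg, ¬ pvWC x := by
          intro x hx hwcx
          rcases List.mem_iff_getElem.mp hx with ⟨j, hj, he⟩
          refine hmin j (by omega) ?_
          rw [pvGetD_append_left seg ('/' :: rest) j hj, List.getD_eq_getElem _ _ hj, he]
          exact hwcx
        have hwcr : pvWC (rest.getD k ' ') := by
          rw [← pvGetD_append_mid seg rest k, ← hkdef]; exact hwc
        have hminr : ∀ j < k, ¬ pvWC (rest.getD j ' ') := by
          intro j hj
          have := hmin (seg.length + 1 + j) (by omega)
          rw [pvGetD_append_mid seg rest j] at this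
          exact this
        have hkr : k < rest.length := by rw [hlcs] at hw; omega
        have ihr := ih rest (by rw [hlcs] at hlen; omega) k hkr hwcr hminr
        have hpass : (!(PySem.Chars.isIn ['*'] seg) && !(PySem.Chars.isIn ['?'] seg)) = true := by
          have h1 : PySem.Chars.isIn ['*'] seg = false := by
            by_contra hb
            have hb' : PySem.Chars.isIn ['*'] seg = true := by simpa using hb
            exact hsegok '*' ((pvIsIn_singleton '*' seg).mp hb') (Or.inl rfl)
          have h2 : PySem.Chars.isIn ['?'] seg = false := by
            by_contra hb
            have hb' : PySem.Chars.isIn ['?'] seg = true := by simpa using hb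
            exact hsegok '?' ((pvIsIn_singleton '?' seg).mp hb') (Or.inr rfl)
          simp [h1, h2]
        rw [hsplit]
        simp only [pvA_loop, hpass]
        rw [pvA_loop_acc, ihr]
        rw [hkdef, pvB_back_append seg rest k]
        by_cases hi0 : pvB_back rest k = 0
        · rw [if_pos hi0, if_pos hi0, if_neg (Nat.succ_ne_zero seg.length)]
          rw [show seg.length + 1 = seg.length + 1 + 0 by omega, pvTake_append]
          simp
        · rw [if_neg hi0, if_neg hi0,
              if_neg (by omega : ¬(seg.length + 1 + pvB_back rest k = 0)), pvTake_append]
          simp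
    · -- no slash: single part, which contains the wildcard
      have hsplit : pvSplit cs = [cs] := pvSplit_no_slash cs hs
      have hmem : cs.getD w ' ' ∈ cs := by
        rw [List.getD_eq_getElem _ _ hw]; exact List.getElem_mem _
      have hfail : (!(PySem.Chars.isIn ['*'] cs) && !(PySem.Chars.isIn ['?'] cs)) = false := by
        rcases hwc with h | h
        · have : PySem.Chars.isIn ['*'] cs = true := (pvIsIn_singleton '*' cs).mpr (h ▸ hmem)
          simp [this]
        · have : PySem.Chars.isIn ['?'] cs = true := (pvIsIn_singleton '?' cs).mpr (h ▸ hmem)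
          simp [this]
      have hb0 : pvB_back cs w = 0 := by
        apply pvB_back_zero
        intro hm
        exact hs (List.mem_of_mem_take hm)
      rw [hsplit, if_pos hb0]
      simp only [pvA_loop, hfail]
      rfl

theorem pvFinal : ∀ (pattern : String),
    get_root_from_glob pattern = get_root_from_glob_alt pattern := by
  intro pattern
  simp only [get_root_from_glob, get_root_from_glob_alt]
  have hsplit : (PySem.Chars.split? pattern.toList ['/']).getD [] = pvSplit pattern.toList := by
    simp [PySem.Chars.split?, pvSplit_eq]
  by_cases hex : ∃ c ∈ pattern.toList, pvWC c
  · -- glob case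
    rcases pvFirst pvWC pattern.toList hex with ⟨u, c, v, he, hc, hu⟩
    have hwfind : pvB_findw pattern.toList.length pattern.toList 0 = u.length := by
      rw [he, pvB_findw_split _ u c v 0 hu hc]
      omega
    have hlt : u.length < pattern.toList.length := by rw [he]; simp
    have hwc : pvWC (pattern.toList.getD u.length ' ') := by
      rw [he, pvGetD_append_self]; exact hc
    have hmin : ∀ j < u.length, ¬ pvWC (pattern.toList.getD j ' ') := by
      intro j hj hwcx
      rw [he, pvGetD_append_left u (c :: v) j hj] at hwcx
      have hm : u.getD j ' ' ∈ u := by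
        rw [List.getD_eq_getElem _ _ hj]; exact List.getElem_mem _
      exact hu _ hm hwcx
    have hcm : c ∈ pattern.toList := by rw [he]; simp
    have hfail : (!(PySem.Chars.isIn ['*'] pattern.toList) && !(PySem.Chars.isIn ['?'] pattern.toList)) = false := by
      rcases hc with h | h
      · have : PySem.Chars.isIn ['*'] pattern.toList = true :=
          (pvIsIn_singleton '*' _).mpr (h ▸ hcm)
        simp [this]
      · have : PySem.Chars.isIn ['?'] pattern.toList = true :=
          (pvIsIn_singleton '?' _).mpr (h ▸ hcm)
        simp [this]
    rw [hfail, hsplit, hwfind]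
    simp only [Bool.false_eq_true, if_false]
    rw [pvMain_G pattern.toList.length pattern.toList le_rfl u.length hlt hwc hmin]
    by_cases hi0 : pvB_back pattern.toList u.length = 0
    · rw [if_pos hi0, if_pos hi0, if_neg (Nat.ne_of_lt hlt)]
    · rw [if_neg hi0, if_neg hi0, pvSlice_nat]
  · -- no wildcard
    have hnone : ∀ c ∈ pattern.toList, ¬ pvWC c := fun c hc hwc => hex ⟨c, hc, hwc⟩
    have hwfind : pvB_findw pattern.toList.length pattern.toList 0 = pattern.toList.length :=
      pvB_findw_none _ _ _ hnone
    have h1 : PySem.Chars.isIn ['*'] pattern.toList = false := by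
      by_contra hb
      have hb' : PySem.Chars.isIn ['*'] pattern.toList = true := by simpa using hb
      exact hnone '*' ((pvIsIn_singleton '*' _).mp hb') (Or.inl rfl)
    have h2 : PySem.Chars.isIn ['?'] pattern.toList = false := by
      by_contra hb
      have hb' : PySem.Chars.isIn ['?'] pattern.toList = true := by simpa using hb
      exact hnone '?' ((pvIsIn_singleton '?' _).mp hb') (Or.inr rfl)
    rw [h1, h2, hsplit, hwfind]
    simp only [Bool.not_false, Bool.and_self, if_true]
    rw [PySem.List.slice_to_neg_one,
        pvMain_NW pattern.toList.length pattern.toList le_rfl]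
    by_cases hi0 : pvB_back pattern.toList pattern.toList.length = 0
    · rw [if_pos hi0, if_pos hi0]
    · rw [if_neg hi0, if_neg hi0, pvSlice_nat]

-- ===== VERDICT (by name: the statement is the Claim_ definition above) =====
theorem get_root_from_glob_spec : Claim_equal_get_root_from_glob := by
  intro pattern _
  unfold Spec_get_root_from_glob
  exact pvFinal pattern
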